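-- pv_equiv track=rewrite | github.com/kirik-12/homework | dz5.py | k_istitle
-- ===== SOURCE A (Python) =====
-- def k_istitle(s: str) -> bool:
--     i = 0
--     d = s.split()
--     while i < len(d):
--         j = 1
--         substring = d[i]
--         if not(substring[0].isalpha()) or 'Z' <= substring[0] <= 'A' or 'z' >= substring[0] >= 'a':
--             return False
--         while j < len(substring):
--             if 'Z' >= substring[j] >='A':
--                 return False
--             j += 1
--         i += 1
--     return True
-- ===== SOURCE B (Python) =====
-- def k_istitle(s: str) -> bool:
--     at_word_start = True
--     for c in s:
--         if c.isspace():
--             at_word_start = True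
--         elif at_word_start:
--             if not c.isalpha() or 'a' <= c <= 'z':
--                 return False
--             at_word_start = False
--         else:
--             if 'A' <= c <= 'Z':
--                 return False
--     return True
-- ===== Notes on version B (the rewrite author's own statement) =====
-- stated objective: simpler
-- what changed: Replaces split()+nested index loops over the word list by a single left-to-right scan of the string with an at_word_start flag, so no word list is ever built.
import Mathlib
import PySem

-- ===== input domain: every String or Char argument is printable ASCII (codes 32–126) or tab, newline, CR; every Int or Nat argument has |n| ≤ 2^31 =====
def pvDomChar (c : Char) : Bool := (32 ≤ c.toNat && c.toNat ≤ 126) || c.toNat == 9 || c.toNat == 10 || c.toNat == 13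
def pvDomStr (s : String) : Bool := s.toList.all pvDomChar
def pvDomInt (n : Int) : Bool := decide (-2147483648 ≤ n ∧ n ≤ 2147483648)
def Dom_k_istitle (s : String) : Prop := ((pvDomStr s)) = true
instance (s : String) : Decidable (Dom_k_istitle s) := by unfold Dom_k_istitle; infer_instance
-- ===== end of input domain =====

-- B drops split()'s word list and scans the string once with an at_word_start flag (objective: simpler).

-- ===== PORT A =====
-- inner 'while j < len(substring)' loop: returns false on the first 'A' ≤ c ≤ 'Z'
def kInnerA : List Char → Bool
  | [] => true
  | c :: rest => if 'A' ≤ c && c ≤ 'Z' then false else kInnerA rest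

-- outer 'while i < len(d)' loop over the words of s.split(); words from split() are
-- nonempty, so the [] word case (where Python would raise IndexError) is unreachable
def kOuterA : List (List Char) → Bool
  | [] => true
  | [] :: ws => kOuterA ws   -- unreachable: split() words are nonempty (Python raises IndexError here)
  | (c0 :: rest) :: ws =>
      if !(PySem.Chars.isalpha c0) || ('Z' ≤ c0 && c0 ≤ 'A') || ('a' ≤ c0 && c0 ≤ 'z') then false
      else if kInnerA rest then kOuterA ws else false

def k_istitle (s : String) : Bool := kOuterA (PySem.Chars.split₀ s.toList)

-- ===== PORT B =====
def bGo : List Char → Bool → Bool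
  | [], _ => true
  | c :: rest, atStart =>
      if PySem.Chars.isspace c then bGo rest true
      else if atStart then
        if !(PySem.Chars.isalpha c) || ('a' ≤ c && c ≤ 'z') then false
        else bGo rest false
      else
        if 'A' ≤ c && c ≤ 'Z' then false
        else bGo rest false

def k_istitle_alt (s : String) : Bool := bGo s.toList true

-- ===== PRECONDITION & SPEC =====
def Spec_k_istitle (s : String) (out : Bool) : Prop := out = k_istitle_alt s
instance (s : String) (out : Bool) : Decidable (Spec_k_istitle s out) := by unfold Spec_k_istitle; infer_instance

-- ===== CLAIM (what is proved, stated in full; the proofs are below) =====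
def Claim_equal_k_istitle : Prop := ∀ (s : String), Dom_k_istitle s → Spec_k_istitle s (k_istitle s)

-- ===== LEMMAS AND PROOFS =====

-- a word passes A's outer-loop body
def wordOk : List Char → Bool
  | [] => true
  | c0 :: rest =>
      (PySem.Chars.isalpha c0 && !('Z' ≤ c0 && c0 ≤ 'A') && !('a' ≤ c0 && c0 ≤ 'z')) && kInnerA rest

-- the current reversed word prefix is still valid
def prefOk (cur : List Char) : Bool := cur.isEmpty || wordOk cur.reverse

-- 'all remaining words pass', with cur the reversed chars of the word in progress
def wordsAll : List Char → List Char → Bool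
  | cur, [] => prefOk cur
  | cur, c :: rest =>
      if PySem.Chars.isspace c then prefOk cur && wordsAll [] rest
      else wordsAll (c :: cur) rest

theorem midFalse (c : Char) : ('Z' ≤ c && c ≤ 'A') = false := by
  by_cases h : 'Z' ≤ c
  · by_cases h' : c ≤ 'A'
    · exact absurd (le_trans h h') (by decide)
    · simp [h']
  · simp [h]

theorem kOuterA_eq_all (ws : List (List Char)) : kOuterA ws = ws.all wordOk := by
  induction ws with
  | nil => rfl
  | cons w ws ih =>
    cases w with
    | nil => simpa [kOuterA, wordOk] using ih
    | cons c0 rest =>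
      cases hA : PySem.Chars.isalpha c0 <;>
        cases hL : ('a' ≤ c0 && c0 ≤ 'z') <;>
        cases hK : kInnerA rest <;>
        simp [kOuterA, wordOk, midFalse, hA, hL, hK, ih]

theorem kInnerA_append (xs ys : List Char) :
    kInnerA (xs ++ ys) = (kInnerA xs && kInnerA ys) := by
  induction xs with
  | nil => simp [kInnerA]
  | cons x xs ih =>
    by_cases h : ('A' ≤ x && x ≤ 'Z') = true <;> simp [kInnerA, h, ih]

theorem prefOk_cons (c : Char) (d : Char) (ds : List Char) :
    prefOk (c :: d :: ds) = (prefOk (d :: ds) && !('A' ≤ c && c ≤ 'Z')) := by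
  simp only [prefOk, List.isEmpty_cons, List.reverse_cons]
  cases h : (ds.reverse ++ [d]) with
  | nil => exact absurd h (by simp)
  | cons x xs =>
    cases hu : ('A' ≤ c && c ≤ 'Z') <;>
      simp [wordOk, kInnerA_append, kInnerA, hu, Bool.and_assoc]

theorem go_all (cs : List Char) : ∀ cur acc,
    (PySem.Chars.split₀.go cs cur acc).all wordOk = (acc.all wordOk && wordsAll cur cs) := by
  induction cs with
  | nil =>
    intro cur acc
    cases cur with
    | nil => simp [PySem.Chars.split₀.go, wordsAll, prefOk]
    | cons d ds => simp [PySem.Chars.split₀.go, wordsAll, prefOk, Bool.and_comm]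
  | cons c rest ih =>
    intro cur acc
    by_cases hs : PySem.Chars.isspace c = true
    · cases cur with
      | nil => simp [PySem.Chars.split₀.go, wordsAll, hs, ih, prefOk]
      | cons d ds =>
        simp only [PySem.Chars.split₀.go, wordsAll, hs, ih, prefOk, if_true,
          List.isEmpty_cons, Bool.false_eq_true, if_false, List.all_cons]
        cases wordOk (d :: ds).reverse <;> simp [Bool.and_comm]
    · simp [PySem.Chars.split₀.go, wordsAll, hs, ih]

theorem wordsAll_false (cs : List Char) : ∀ cur, prefOk cur = false → wordsAll cur cs = false := by
  induction cs with
  | nil => intro cur h; simpa [wordsAll] using h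
  | cons c rest ih =>
    intro cur h
    by_cases hs : PySem.Chars.isspace c = true
    · simp [wordsAll, hs, h]
    · cases cur with
      | nil => simp [prefOk] at h
      | cons d ds =>
        rw [wordsAll, if_neg hs]
        exact ih _ (by rw [prefOk_cons, h, Bool.false_and])

theorem wordsAll_eq_bGo (cs : List Char) : ∀ cur, prefOk cur = true →
    wordsAll cur cs = bGo cs cur.isEmpty := by
  induction cs with
  | nil => intro cur h; simpa [wordsAll, bGo] using h
  | cons c rest ih =>
    intro cur h
    by_cases hs : PySem.Chars.isspace c = true
    · cases cur <;> simp [wordsAll, bGo, hs, h, ih [] rfl]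
    · cases cur with
      | nil =>
        rw [wordsAll, if_neg hs, bGo]
        simp only [if_neg hs, List.isEmpty_nil, if_true]
        by_cases hc : (!(PySem.Chars.isalpha c) || ('a' ≤ c && c ≤ 'z')) = true
        · rw [if_pos hc]
          apply wordsAll_false
          simp only [prefOk, List.isEmpty_cons, List.reverse_cons, List.reverse_nil,
            List.nil_append, wordOk, midFalse, kInnerA]
          cases hA : PySem.Chars.isalpha c <;> cases hL : ('a' ≤ c && c ≤ 'z') <;>
            simp_all
        · rw [if_neg hc]
          exact ih _ (by
            simp only [prefOk, List.isEmpty_cons, List.reverse_cons, List.reverse_nil,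
              List.nil_append, wordOk, midFalse, kInnerA]
            cases hA : PySem.Chars.isalpha c <;> cases hL : ('a' ≤ c && c ≤ 'z') <;>
              simp_all)
      | cons d ds =>
        rw [wordsAll, if_neg hs, bGo]
        simp only [if_neg hs, List.isEmpty_cons, Bool.false_eq_true, if_false]
        by_cases hu : ('A' ≤ c && c ≤ 'Z') = true
        · rw [if_pos hu]
          exact wordsAll_false _ _ (by rw [prefOk_cons, hu]; simp)
        · rw [if_neg hu]
          exact ih _ (by rw [prefOk_cons, h]; simp [hu])

-- ===== VERDICT (by name: the statement is the Claim_ definition above) =====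
theorem k_istitle_spec : Claim_equal_k_istitle := by
  intro s _
  show k_istitle s = k_istitle_alt s
  rw [k_istitle, k_istitle_alt, PySem.Chars.split₀, kOuterA_eq_all, go_all]
  simpa using wordsAll_eq_bGo s.toList [] rfl
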